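-- pv_equiv track=rewrite | github.com/m0nkmaster/afk | src/afk/sources/github.py | _priority_from_labels
-- ===== SOURCE A (Python) =====
-- def _priority_from_labels(labels: list[str]) -> int:
--     """Infer priority from issue labels."""
--     labels_lower = [lbl.lower() for lbl in labels]
--
--     high_labels = {"priority:high", "critical", "urgent", "p0", "p1", "high-priority"}
--     low_labels = {"priority:low", "minor", "p3", "p4", "low-priority", "nice-to-have"}
--
--     if any(lbl in high_labels for lbl in labels_lower):
--         return 1
--     elif any(lbl in low_labels for lbl in labels_lower):
--         return 4
--     else:
--         return 3
-- ===== SOURCE B (Python) =====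
-- _PRIORITY_MAP = {
--     "priority:high": 1, "critical": 1, "urgent": 1, "p0": 1, "p1": 1, "high-priority": 1,
--     "priority:low": 4, "minor": 4, "p3": 4, "p4": 4, "low-priority": 4, "nice-to-have": 4,
-- }
--
-- def _priority_from_labels(labels: list[str]) -> int:
--     """Infer priority: map each known label to a numeric priority and take the minimum."""
--     vals = [_PRIORITY_MAP[x] for x in (lbl.lower() for lbl in labels) if x in _PRIORITY_MAP]
--     return min(vals, default=3)
-- ===== Notes on version B (the rewrite author's own statement) =====
-- stated objective: alternative
-- what changed: Replaced the two boolean any() membership scans over two sets by a single label-to-number dictionary: each recognised label is mapped to its numeric priority (1 or 4) and the result is the minimum of those numbers with default 3, so precedence is arithmetic (min) instead of branch order.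
import Mathlib
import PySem

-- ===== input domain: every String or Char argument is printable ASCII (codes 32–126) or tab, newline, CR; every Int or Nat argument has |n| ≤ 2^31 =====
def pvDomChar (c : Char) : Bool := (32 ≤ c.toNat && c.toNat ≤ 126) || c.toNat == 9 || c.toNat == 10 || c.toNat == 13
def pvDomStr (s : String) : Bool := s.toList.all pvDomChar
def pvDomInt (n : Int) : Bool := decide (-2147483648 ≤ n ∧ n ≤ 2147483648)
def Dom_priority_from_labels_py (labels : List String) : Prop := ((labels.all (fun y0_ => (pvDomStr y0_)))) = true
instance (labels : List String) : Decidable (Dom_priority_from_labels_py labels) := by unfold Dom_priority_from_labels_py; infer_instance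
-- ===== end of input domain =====

-- B replaces A's two boolean any() set-membership scans by a single label→number map:
-- each recognised label maps to 1 or 4 and the answer is min of those numbers, default 3.

-- ===== PORT A =====
def pvHighLabels : List String :=
  ["priority:high", "critical", "urgent", "p0", "p1", "high-priority"]
def pvLowLabels : List String :=
  ["priority:low", "minor", "p3", "p4", "low-priority", "nice-to-have"]

def priority_from_labels_py (labels : List String) : Int :=
  let labels_lower := labels.map (fun lbl => PySem.Str.lower lbl)
  if labels_lower.any (fun lbl => pvHighLabels.contains lbl) then 1
  else if labels_lower.any (fun lbl => pvLowLabels.contains lbl) then 4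
  else 3

-- ===== PORT B =====
def pvPriorityMap : PySem.Dict String Int := PySem.Dict.mk
  [("priority:high", 1), ("critical", 1), ("urgent", 1), ("p0", 1), ("p1", 1), ("high-priority", 1),
   ("priority:low", 4), ("minor", 4), ("p3", 4), ("p4", 4), ("low-priority", 4), ("nice-to-have", 4)]

def priority_from_labels_py_alt (labels : List String) : Int :=
  let vals := labels.filterMap (fun lbl => pvPriorityMap.get? (PySem.Str.lower lbl))
  match vals with
  | [] => 3
  | v :: rest => rest.foldl min v

-- ===== PRECONDITION & SPEC =====
def Spec_priority_from_labels_py (labels : List String) (out : Int) : Prop := out = priority_from_labels_py_alt labels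
instance (labels : List String) (out : Int) : Decidable (Spec_priority_from_labels_py labels out) := by unfold Spec_priority_from_labels_py; infer_instance

-- ===== CLAIM (what is proved, stated in full; the proofs are below) =====
def Claim_equal_priority_from_labels_py : Prop := ∀ (labels : List String), Dom_priority_from_labels_py labels → Spec_priority_from_labels_py labels (priority_from_labels_py labels)

-- ===== LEMMAS AND PROOFS =====

-- the literal map's lookup, characterised by A's two label sets
set_option maxHeartbeats 1000000 in
lemma pvPriorityMap_get? (x : String) :
    pvPriorityMap.get? x =
      if x ∈ pvHighLabels then some 1
      else if x ∈ pvLowLabels then some 4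
      else none := by
  by_cases h1 : x ∈ pvHighLabels
  · rw [if_pos h1]
    simp only [pvHighLabels, List.mem_cons, List.not_mem_nil, or_false] at h1
    rcases h1 with rfl | rfl | rfl | rfl | rfl | rfl <;> decide
  · rw [if_neg h1]
    by_cases h2 : x ∈ pvLowLabels
    · rw [if_pos h2]
      simp only [pvLowLabels, List.mem_cons, List.not_mem_nil, or_false] at h2
      rcases h2 with rfl | rfl | rfl | rfl | rfl | rfl <;> decide
    · rw [if_neg h2]
      simp only [pvHighLabels, List.mem_cons, List.not_mem_nil, or_false, not_or] at h1
      simp only [pvLowLabels, List.mem_cons, List.not_mem_nil, or_false, not_or] at h2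
      simp only [pvPriorityMap, PySem.Dict.get?_mk_cons, beq_iff_eq]
      split_ifs with g1 g2 g3 g4 g5 g6 g7 g8 g9 g10 g11 g12
      · exact absurd g1.symm h1.1
      · exact absurd g2.symm h1.2.1
      · exact absurd g3.symm h1.2.2.1
      · exact absurd g4.symm h1.2.2.2.1
      · exact absurd g5.symm h1.2.2.2.2.1
      · exact absurd g6.symm h1.2.2.2.2.2
      · exact absurd g7.symm h2.1
      · exact absurd g8.symm h2.2.1
      · exact absurd g9.symm h2.2.2.1
      · exact absurd g10.symm h2.2.2.2.1
      · exact absurd g11.symm h2.2.2.2.2.1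
      · exact absurd g12.symm h2.2.2.2.2.2
      · rfl

-- min-fold over a list whose elements are all 1 or 4
lemma foldl_min_one_four (rest : List Int) (v : Int)
    (hv : v = 1 ∨ v = 4) (hr : ∀ w ∈ rest, w = 1 ∨ w = 4) :
    rest.foldl min v = if v = 1 ∨ 1 ∈ rest then 1 else 4 := by
  induction rest generalizing v with
  | nil => rcases hv with h | h <;> simp [h]
  | cons a t ih =>
      have ha := hr a (by simp)
      have ht : ∀ w ∈ t, w = 1 ∨ w = 4 := fun w hw => hr w (by simp [hw])
      have hm : min v a = 1 ∨ min v a = 4 := by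
        rcases hv with h | h <;> rcases ha with h' | h' <;> simp [h, h']
      have hiff : (min v a = 1) ↔ (v = 1 ∨ a = 1) := by
        rcases hv with h | h <;> rcases ha with h' | h' <;> simp [h, h']
      rw [List.foldl_cons, ih (min v a) hm ht]
      simp only [List.mem_cons, hiff]
      split_ifs <;> tauto

-- ===== VERDICT (by name: the statement is the Claim_ definition above) =====
theorem priority_from_labels_py_spec : Claim_equal_priority_from_labels_py := by
  intro labels _
  unfold Spec_priority_from_labels_py priority_from_labels_py priority_from_labels_py_alt
  simp only [pvPriorityMap_get?, List.any_map, Function.comp_def, List.any_eq_true,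
    List.contains_iff_mem]
  set g : String → Option Int := fun lbl =>
    if PySem.Str.lower lbl ∈ pvHighLabels then some 1
    else if PySem.Str.lower lbl ∈ pvLowLabels then some 4
    else none with hg
  have hmem : ∀ w ∈ labels.filterMap g, w = 1 ∨ w = 4 := by
    intro w hw
    simp only [List.mem_filterMap] at hw
    obtain ⟨lbl, _, hgl⟩ := hw
    simp only [hg] at hgl
    split_ifs at hgl <;> simp_all
  have hone : (1 : Int) ∈ labels.filterMap g ↔
      ∃ lbl ∈ labels, PySem.Str.lower lbl ∈ pvHighLabels := by
    simp only [List.mem_filterMap]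
    constructor
    · rintro ⟨lbl, hm, hgl⟩
      simp only [hg] at hgl
      split_ifs at hgl with h1 h2
      · exact ⟨lbl, hm, h1⟩
      all_goals exact absurd hgl (by simp)
    · rintro ⟨lbl, hm, h1⟩
      exact ⟨lbl, hm, by simp [hg, h1]⟩
  have hnil : labels.filterMap g = [] ↔
      ((¬ ∃ lbl ∈ labels, PySem.Str.lower lbl ∈ pvHighLabels) ∧
       (¬ ∃ lbl ∈ labels, PySem.Str.lower lbl ∈ pvLowLabels)) := by
    simp only [List.filterMap_eq_nil_iff, not_exists, not_and]
    constructor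
    · intro h
      refine ⟨?_, ?_⟩ <;> intro lbl hm hbad <;> have h2 := h lbl hm <;>
        simp only [hg] at h2 <;> split_ifs at h2
    · rintro ⟨h1, h2⟩ lbl hm
      simp [hg, h1 lbl hm, h2 lbl hm]
  by_cases hA : ∃ lbl ∈ labels, PySem.Str.lower lbl ∈ pvHighLabels
  · have h1 : (1 : Int) ∈ labels.filterMap g := hone.mpr hA
    rcases hv : labels.filterMap g with _ | ⟨v, rest⟩
    · rw [hv] at h1; simp at h1
    · have hv14 : v = 1 ∨ v = 4 := hmem v (by simp [hv])
      have hr : ∀ w ∈ rest, w = 1 ∨ w = 4 := fun w hw => hmem w (by simp [hv, hw])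
      rw [hv] at h1
      simp only [hA, if_true, foldl_min_one_four rest v hv14 hr]
      simp only [List.mem_cons] at h1
      rcases h1 with h1 | h1 <;> simp [h1]
  · by_cases hB : ∃ lbl ∈ labels, PySem.Str.lower lbl ∈ pvLowLabels
    · rcases hv : labels.filterMap g with _ | ⟨v, rest⟩
      · exact absurd hB (hnil.mp hv).2
      · have hv14 : v = 1 ∨ v = 4 := hmem v (by simp [hv])
        have hr : ∀ w ∈ rest, w = 1 ∨ w = 4 := fun w hw => hmem w (by simp [hv, hw])
        have hno1 : (1 : Int) ∉ labels.filterMap g := fun h => hA (hone.mp h)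
        rw [hv] at hno1
        simp only [List.mem_cons, not_or] at hno1
        have hv4 : v = 4 := by
          rcases hv14 with h | h
          · exact absurd h.symm hno1.1
          · exact h
        simp only [foldl_min_one_four rest v hv14 hr]
        have : ¬ (v = 1 ∨ 1 ∈ rest) := by
          rintro (h | h)
          · exact hno1.1 h.symm
          · exact hno1.2 h
        simp [hA, hB, this]
    · have : labels.filterMap g = [] := hnil.mpr ⟨hA, hB⟩
      simp [this, hA, hB]
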